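-- pv_equiv track=rewrite | github.com/aayush4vedi/newsx | utils.py | belongstodevelopment
-- ===== SOURCE A (Python) =====
-- def belongstodevelopment(s):
--
--     development_tags = [
--         'algorithms',
--         'o.s',
--         'osdev',
--         'hack',
--         'database',
--         'programming',
--         'programing',
--         'coding',
--         'software',
--         'plt',
--         'c-language',
--         'c language',
--         'c++',
--         'cpp',
--         'golang',
--         'go-lang',
--         'go lang',
--         'python',
--         'elixir',
--         'erlang',
--         'fortran',
--         'haskell',
--         'java',
--         'javascript',
--         'lisp',
--         'perl',
--         'php',
--         'ruby',
--         'rust',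
--         'dotnet',
--         'Kotlin',
--         'rails',
--         'django',
--         'react js',
--         'react-native',
--         'react native',
--         'flutter',
--         'kotlin',
--         'sql',
--         'vcs',
--         'git',
--         'virtualiz',
--         'browser',
--         'aws',
--         'cloud',
--         'azuredevops',
--         'kubernetes',
--         'k8',
--         'docker',
--         'gcp',
--         'emacs',
--         'vim',
--         'neovim',
--         'devops',
--         'security',
--         'netsec',
--         'compsec',
--         'websec',
--         'privacy',
--         'webdev',
--         'release',
--         'announce',
--         'debug',
--         'testing',
--         'practice',
--         'tinycode',
--         'api',
--         'games',
--         'gamedev',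
--         'tech',
--         'productivity',
--         'opensource',
--         'open-source',
--         'open source'
--     ]
--
--     dev_tags_exact = [
--         'os',
--         'c',
--         'go',
--         'js',
--     ]
--
--     return any(development_tag in ','.join(s) for development_tag in development_tags) or not set(dev_tags_exact).isdisjoint(s)
-- ===== SOURCE B (Python) =====
-- # Same keyword predicate, but the keywords live in ONE csv string split at load
-- # time, and the check is a single per-element pass (exact hit, else substring
-- # scan) with early exit -- valid because no keyword contains ',' so a keyword
-- # occurs in ','.join(s) iff it occurs in some element of s.
--
-- _KW_CSV = ("algorithms,o.s,osdev,hack,database,programming,programing,coding,"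
--            "software,plt,c-language,c language,c++,cpp,golang,go-lang,go lang,"
--            "python,elixir,erlang,fortran,haskell,java,javascript,lisp,perl,php,"
--            "ruby,rust,dotnet,Kotlin,rails,django,react js,react-native,"
--            "react native,flutter,kotlin,sql,vcs,git,virtualiz,browser,aws,"
--            "cloud,azuredevops,kubernetes,k8,docker,gcp,emacs,vim,neovim,devops,"
--            "security,netsec,compsec,websec,privacy,webdev,release,announce,"
--            "debug,testing,practice,tinycode,api,games,gamedev,tech,"
--            "productivity,opensource,open-source,open source")
-- _KEYWORDS = _KW_CSV.split(',')
-- _EXACT = "os c go js".split()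
--
-- def belongstodevelopment(s):
--     for item in s:
--         if item in _EXACT:
--             return True
--         for kw in _KEYWORDS:
--             if kw in item:
--                 return True
--     return False
-- ===== Notes on version B (the rewrite author's own statement) =====
-- stated objective: alternative
-- what changed: B stores the keywords as one csv string split once at load time and replaces A's per-keyword rescans of ','.join(s) (plus set-disjointness test) by a single early-exit pass over the list, checking each element for an exact hit or any keyword substring; correct because no keyword contains ','.
import Mathlib
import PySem

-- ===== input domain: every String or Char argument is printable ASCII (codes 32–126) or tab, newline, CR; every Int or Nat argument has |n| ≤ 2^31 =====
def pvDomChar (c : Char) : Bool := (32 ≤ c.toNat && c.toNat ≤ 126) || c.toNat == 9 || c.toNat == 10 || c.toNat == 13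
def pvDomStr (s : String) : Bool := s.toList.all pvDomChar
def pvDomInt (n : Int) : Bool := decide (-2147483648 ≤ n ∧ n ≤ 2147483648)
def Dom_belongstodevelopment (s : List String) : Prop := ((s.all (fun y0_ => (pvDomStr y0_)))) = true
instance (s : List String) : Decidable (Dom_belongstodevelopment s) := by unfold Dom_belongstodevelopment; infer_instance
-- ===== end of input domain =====

-- B keeps the keywords in one csv string split once and replaces A's per-keyword
-- rescans of ','.join(s) by a single early-exit pass over the list elements.

-- ===== PORT A =====
-- A's local list 'development_tags'
def devTagsA : List String :=
  ["algorithms", "o.s", "osdev", "hack", "database", "programming",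
   "programing", "coding", "software", "plt", "c-language", "c language",
   "c++", "cpp", "golang", "go-lang", "go lang", "python", "elixir",
   "erlang", "fortran", "haskell", "java", "javascript", "lisp", "perl",
   "php", "ruby", "rust", "dotnet", "Kotlin", "rails", "django", "react js",
   "react-native", "react native", "flutter", "kotlin", "sql", "vcs", "git",
   "virtualiz", "browser", "aws", "cloud", "azuredevops", "kubernetes",
   "k8", "docker", "gcp", "emacs", "vim", "neovim", "devops", "security",
   "netsec", "compsec", "websec", "privacy", "webdev", "release",
   "announce", "debug", "testing", "practice", "tinycode", "api", "games",
   "gamedev", "tech", "productivity", "opensource", "open-source",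
   "open source"]

-- A's local list 'dev_tags_exact'
def devExactA : List String := ["os", "c", "go", "js"]

def belongstodevelopment (s : List String) : Bool :=
  (devTagsA.any fun development_tag => PySem.Str.isIn development_tag (PySem.Str.join "," s)) ||
    !(PySem.Set.isdisjoint (PySem.Set.ofList devExactA) s)

-- ===== PORT B =====
-- module constant _KW_CSV
def pvKwCsv : String :=
  "algorithms,o.s,osdev,hack,database,programming,programing,coding,software,plt,c-language,c language,c++,cpp,golang,go-lang,go lang,python,elixir,erlang,fortran,haskell,java,javascript,lisp,perl,php,ruby,rust,dotnet,Kotlin,rails,django,react js,react-native,react native,flutter,kotlin,sql,vcs,git,virtualiz,browser,aws,cloud,azuredevops,kubernetes,k8,docker,gcp,emacs,vim,neovim,devops,security,netsec,compsec,websec,privacy,webdev,release,announce,debug,testing,practice,tinycode,api,games,gamedev,tech,productivity,opensource,open-source,open source"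

-- module constant _KEYWORDS = _KW_CSV.split(',')   (getD: the separator "," is non-empty, so split? is some)
def pvKeywords : List String := (PySem.Str.split? pvKwCsv ",").getD []

-- module constant _EXACT = "os c go js".split()
def pvExact : List String := PySem.Str.split₀ "os c go js"

-- inner loop: 'for kw in _KEYWORDS: if kw in item: return True'
def pvScanKw (item : String) : List String → Bool
  | [] => false
  | kw :: rest => if PySem.Str.isIn kw item then true else pvScanKw item rest

-- outer loop with early exit
def belongstodevelopment_alt : List String → Bool
  | [] => false
  | item :: rest =>
    if pvExact.contains item then true
    else if pvScanKw item pvKeywords then true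
    else belongstodevelopment_alt rest

-- ===== PRECONDITION & SPEC =====
def Spec_belongstodevelopment (s : List String) (out : Bool) : Prop := out = belongstodevelopment_alt s
instance (s : List String) (out : Bool) : Decidable (Spec_belongstodevelopment s out) := by unfold Spec_belongstodevelopment; infer_instance

-- ===== CLAIM (what is proved, stated in full; the proofs are below) =====
def Claim_equal_belongstodevelopment : Prop := ∀ (s : List String), Dom_belongstodevelopment s → Spec_belongstodevelopment s (belongstodevelopment s)

-- ===== LEMMAS AND PROOFS =====

-- B's derived constants coincide with A's literal lists.
set_option maxRecDepth 8192 in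
set_option maxHeartbeats 2000000 in
lemma pv_kw_eq : pvKeywords = devTagsA := by decide

lemma pv_exact_eq : pvExact = devExactA := by decide

-- the inner loop is an 'any' over the keywords
lemma pv_scanKw_eq (item : String) (l : List String) :
    pvScanKw item l = l.any fun kw => PySem.Str.isIn kw item := by
  induction l with
  | nil => rfl
  | cons kw rest ih =>
    rw [pvScanKw, ih, List.any_cons]
    cases hc : PySem.Str.isIn kw item <;> simp [hc]

-- the outer loop is an 'any' over the elements
lemma pv_alt_eq (s : List String) :
    belongstodevelopment_alt s =
      s.any fun item => pvExact.contains item || pvScanKw item pvKeywords := by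
  induction s with
  | nil => rfl
  | cons item rest ih =>
    rw [belongstodevelopment_alt, ih, List.any_cons]
    cases h1 : pvExact.contains item <;> cases h2 : pvScanKw item pvKeywords <;>
      simp [h1, h2]

-- If t is a prefix of a ++ c :: b and c ∉ t, then t is already a prefix of a.
lemma pv_prefix_split {t a b : List Char} {c : Char} (hc : c ∉ t) (h : t <+: a ++ c :: b) :
    t <+: a := by
  induction t generalizing a with
  | nil => exact List.nil_prefix
  | cons x t' ih =>
    cases a with
    | nil =>
      rw [List.nil_append, List.cons_prefix_cons] at h
      exact absurd (h.1 ▸ List.mem_cons_self ..) hc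
    | cons y a' =>
      rw [List.cons_append, List.cons_prefix_cons] at h
      exact List.cons_prefix_cons.mpr
        ⟨h.1, ih (fun hm => hc (List.mem_cons_of_mem _ hm)) h.2⟩

-- If t is an infix of a ++ c :: b and c ∉ t, then t is an infix of a or of b.
lemma pv_infix_split {t a b : List Char} {c : Char} (hc : c ∉ t) (h : t <:+: a ++ c :: b) :
    t <:+: a ∨ t <:+: b := by
  induction a with
  | nil =>
    rw [List.nil_append] at h
    rcases List.infix_cons_iff.mp h with hp | hi
    · have ht : t <+: ([] : List Char) := pv_prefix_split hc (by simpa using hp)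
      left
      simp [List.prefix_nil.mp ht]
    · exact Or.inr hi
  | cons y a' ih =>
    rw [List.cons_append] at h
    rcases List.infix_cons_iff.mp h with hp | hi
    · exact Or.inl (pv_prefix_split hc hp).isInfix
    · rcases ih hi with h1 | h2
      · exact Or.inl (h1.trans (List.suffix_cons y a').isInfix)
      · exact Or.inr h2

-- A nonempty comma-free t is an infix of the comma-join of L iff it is an infix of some element.
lemma pv_infix_intercalate_iff {t : List Char} (hne : t ≠ []) (hc : ',' ∉ t)
    (L : List (List Char)) :
    (t <:+: [','].intercalate L) ↔ ∃ l ∈ L, t <:+: l := by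
  induction L with
  | nil =>
    simp only [List.intercalate, List.intersperse, List.flatten_nil, List.not_mem_nil]
    constructor
    · intro h; exact absurd (List.infix_nil.mp h) hne
    · rintro ⟨l, hl, -⟩; exact hl.elim
  | cons x L' ih =>
    cases L' with
    | nil =>
      have hx : [','].intercalate [x] = x := by simp [List.intercalate, List.intersperse]
      rw [hx]
      constructor
      · intro h; exact ⟨x, List.mem_singleton.mpr rfl, h⟩
      · rintro ⟨l, hl, hinf⟩; rwa [List.mem_singleton.mp hl] at hinf
    | cons y r =>
      have hrw : [','].intercalate (x :: y :: r) = x ++ ',' :: [','].intercalate (y :: r) := by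
        simp [List.intercalate, List.intersperse]
      rw [hrw]
      constructor
      · intro h
        rcases pv_infix_split hc h with h1 | h2
        · exact ⟨x, List.mem_cons_self .., h1⟩
        · rcases ih.mp h2 with ⟨l, hl, hinf⟩
          exact ⟨l, List.mem_cons_of_mem _ hl, hinf⟩
      · rintro ⟨l, hl, hinf⟩
        rcases List.mem_cons.mp hl with rfl | hl'
        · exact hinf.trans (List.prefix_append _ _).isInfix
        · have h2 := ih.mpr ⟨l, hl', hinf⟩
          exact h2.trans ((List.suffix_cons ',' _).trans (List.suffix_append _ _)).isInfix

lemma pv_toList_join (s : List String) :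
    (PySem.Str.join "," s).toList = [','].intercalate (s.map String.toList) := by
  simp [PySem.Str.join, PySem.Chars.join]

-- each keyword is nonempty and comma-free
lemma pv_tags_ok : ∀ t ∈ devTagsA, t.toList ≠ [] ∧ ',' ∉ t.toList := by decide

lemma pv_main (s : List String) : belongstodevelopment s = belongstodevelopment_alt s := by
  have hof : PySem.Set.ofList devExactA = devExactA := by decide
  have hdis : ((!(PySem.Set.isdisjoint (PySem.Set.ofList devExactA) s)) = true) ↔
      ∃ x ∈ devExactA, x ∈ s := by
    rw [Bool.not_eq_true', Bool.eq_false_iff, Ne, PySem.Set.isdisjoint_iff, hof]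
    push Not
    simp
  rw [Bool.eq_iff_iff, pv_alt_eq]
  simp only [belongstodevelopment, Bool.or_eq_true, List.any_eq_true,
    pv_scanKw_eq, pv_kw_eq, pv_exact_eq, PySem.Str.isIn_iff_infix,
    List.contains_eq_mem, decide_eq_true_eq, pv_toList_join, hdis]
  constructor
  · rintro (⟨t, ht, hinf⟩ | ⟨x, hx, hxs⟩)
    · obtain ⟨hne, hc⟩ := pv_tags_ok t ht
      rcases (pv_infix_intercalate_iff hne hc _).mp hinf with ⟨l, hl, hinfl⟩
      rcases List.mem_map.mp hl with ⟨e, he, rfl⟩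
      exact ⟨e, he, Or.inr ⟨t, ht, hinfl⟩⟩
    · exact ⟨x, hxs, Or.inl hx⟩
  · rintro ⟨e, he, hx | ⟨t, ht, hinf⟩⟩
    · exact Or.inr ⟨e, hx, he⟩
    · obtain ⟨hne, hc⟩ := pv_tags_ok t ht
      exact Or.inl ⟨t, ht, (pv_infix_intercalate_iff hne hc _).mpr
        ⟨e.toList, List.mem_map.mpr ⟨e, he, rfl⟩, hinf⟩⟩

-- ===== VERDICT (by name: the statement is the Claim_ definition above) =====
theorem belongstodevelopment_spec : Claim_equal_belongstodevelopment := by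
  intro s _
  unfold Spec_belongstodevelopment
  exact pv_main s
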